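-- pv_equiv track=rewrite | github.com/Hi-LinkDuino/RM56 | drivers/framework/tools/hdi-gen/build_hdi_files.py | translate_file_name
-- ===== SOURCE A (Python) =====
-- def translate_file_name(file_name):
--     name = file_name[1:] if file_name.startswith("I") else file_name
--     translate_name = ""
--     num = 0
--     for c in name:
--         if c >= 'A' and c <= 'Z':
--             if num > 1:
--                 translate_name += "_"
--             translate_name += c.lower()
--         else:
--             translate_name += c
--         num += 1
--     return translate_name
-- ===== SOURCE B (Python) =====
-- def translate_file_name(file_name):
--     name = file_name[1:] if file_name.startswith("I") else file_name
--     pieces = [list(name[:2])]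
--     for c in name[2:]:
--         if 'A' <= c <= 'Z':
--             pieces.append([c])
--         else:
--             pieces[-1].append(c)
--     return "_".join("".join(p) for p in pieces).lower()
-- ===== Notes on version B (the rewrite author's own statement) =====
-- stated objective: alternative
-- what changed: Replaces A's stateful accumulate-with-position-counter loop by a group-then-join algorithm: collect word pieces in a list (a new piece starts at each uppercase letter past position 1), join the pieces with underscores and lowercase the joined string once at the end.
import Mathlib
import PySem

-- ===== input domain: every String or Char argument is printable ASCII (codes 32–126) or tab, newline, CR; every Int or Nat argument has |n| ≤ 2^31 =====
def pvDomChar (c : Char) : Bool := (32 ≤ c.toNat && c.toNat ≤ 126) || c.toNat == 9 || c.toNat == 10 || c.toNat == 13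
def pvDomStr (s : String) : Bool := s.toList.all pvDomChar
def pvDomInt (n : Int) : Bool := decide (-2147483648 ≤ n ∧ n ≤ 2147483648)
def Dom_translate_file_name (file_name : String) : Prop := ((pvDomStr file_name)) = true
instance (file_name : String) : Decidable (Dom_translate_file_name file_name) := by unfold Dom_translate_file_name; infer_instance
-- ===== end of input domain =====

-- B replaces A's per-character accumulator-with-counter loop by a group-then-join algorithm:
-- it collects word pieces in a list (a new piece at each uppercase letter past position 1),
-- joins them with underscores and lowercases the joined string once at the end; same cost.

-- ===== PORT A =====
-- A's for-loop over `name` with accumulator `translate_name` and counter `num`.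
def tfnLoopA : List Char → List Char → Nat → List Char
  | [], acc, _ => acc
  | c :: cs, acc, num =>
    if 'A' ≤ c ∧ c ≤ 'Z' then
      tfnLoopA cs ((if num > 1 then acc ++ ['_'] else acc) ++ [PySem.Chars.lowerChar c]) (num + 1)
    else
      tfnLoopA cs (acc ++ [c]) (num + 1)

def translate_file_name (file_name : String) : String :=
  let name := if PySem.Str.startswith file_name "I" then file_name.toList.drop 1 else file_name.toList
  String.ofList (tfnLoopA name [] 0)

-- ===== PORT B =====
-- Source B's loop body: start a new piece at an uppercase letter, else extend the last piece.
def tfnStepB (pieces : List (List Char)) (c : Char) : List (List Char) :=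
  if 'A' ≤ c ∧ c ≤ 'Z' then pieces ++ [[c]]
  else pieces.dropLast ++ [(pieces.getLast?.getD []) ++ [c]]

def translate_file_name_alt (file_name : String) : String :=
  let name := if PySem.Str.startswith file_name "I" then file_name.toList.drop 1 else file_name.toList
  let pieces := (name.drop 2).foldl tfnStepB [name.take 2]
  String.ofList (PySem.Chars.lower (PySem.Chars.join ['_'] (pieces.map (fun p => PySem.Chars.join [] (p.map ([·]))))))

-- ===== PRECONDITION & SPEC =====
def Spec_translate_file_name (file_name : String) (out : String) : Prop := out = translate_file_name_alt file_name
instance (file_name : String) (out : String) : Decidable (Spec_translate_file_name file_name out) := by unfold Spec_translate_file_name; infer_instance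

-- ===== CLAIM (what is proved, stated in full; the proofs are below) =====
def Claim_equal_translate_file_name : Prop := ∀ (file_name : String), Dom_translate_file_name file_name → Spec_translate_file_name file_name (translate_file_name file_name)

-- ===== LEMMAS AND PROOFS =====

-- the canonical per-character pieces both sides reduce to
def tfnHeadChar (c : Char) : Char := if 'A' ≤ c ∧ c ≤ 'Z' then PySem.Chars.lowerChar c else c
def tfnTailChar (c : Char) : List Char := if 'A' ≤ c ∧ c ≤ 'Z' then ['_', PySem.Chars.lowerChar c] else [c]
def tfnRawChar (c : Char) : List Char := if 'A' ≤ c ∧ c ≤ 'Z' then ['_', c] else [c]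

theorem tfnLowerChar_eq_headChar (c : Char) : PySem.Chars.lowerChar c = tfnHeadChar c := by
  by_cases h : 'A' ≤ c ∧ c ≤ 'Z'
  · simp [tfnHeadChar, h]
  · have hu : PySem.Chars.isupper c = false := by
      simp only [PySem.Chars.isupper, Bool.and_eq_false_iff, decide_eq_false_iff_not]
      by_cases h1 : 'A' ≤ c
      · exact Or.inr (fun h2 => h ⟨h1, h2⟩)
      · exact Or.inl h1
    simp [tfnHeadChar, h, PySem.Chars.lowerChar, hu]

-- A side: once num ≥ 2, A's loop appends exactly the flat-map of tfnTailChar.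
theorem tfnLoopA_ge_two (cs : List Char) : ∀ (acc : List Char) (num : Nat), 2 ≤ num →
    tfnLoopA cs acc num = acc ++ cs.flatMap tfnTailChar := by
  induction cs with
  | nil => intro acc num _; simp [tfnLoopA]
  | cons c cs ih =>
    intro acc num h
    by_cases hc : 'A' ≤ c ∧ c ≤ 'Z' <;>
      simp [tfnLoopA, hc, (by omega : num > 1),
        ih _ (num + 1) (by omega), tfnTailChar]

theorem tfnLoopA_eq (name : List Char) :
    tfnLoopA name [] 0 = (name.take 2).map tfnHeadChar ++ (name.drop 2).flatMap tfnTailChar := by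
  match name with
  | [] => simp [tfnLoopA]
  | [a] =>
    by_cases ha : 'A' ≤ a ∧ a ≤ 'Z' <;> simp [tfnLoopA, ha, tfnHeadChar]
  | a :: b :: rest =>
    by_cases ha : 'A' ≤ a ∧ a ≤ 'Z' <;>
      by_cases hb' : 'A' ≤ b ∧ b ≤ 'Z' <;>
        simp [tfnLoopA, ha, hb', tfnHeadChar, tfnLoopA_ge_two rest _ 2 (by omega)]

-- intercalate over a nonempty tail unfolds one separator
theorem tfnIc_cons (sep p : List Char) :
    ∀ (ts : List (List Char)), ts ≠ [] →
      List.intercalate sep (p :: ts) = p ++ sep ++ List.intercalate sep ts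
  | [], h => absurd rfl h
  | _ :: _, _ => by simp [List.intercalate]

-- B side: joining after appending a fresh singleton piece
theorem tfnIc_append_singleton (sep x : List Char) :
    ∀ (ps : List (List Char)), ps ≠ [] →
      List.intercalate sep (ps ++ [x]) = List.intercalate sep ps ++ sep ++ x
  | [], h => absurd rfl h
  | [p], _ => by simp [List.intercalate]
  | p :: q :: qs, _ => by
    rw [List.cons_append, tfnIc_cons sep p (q :: qs ++ [x]) (by simp),
      tfnIc_cons sep p (q :: qs) (by simp),
      tfnIc_append_singleton sep x (q :: qs) (by simp)]
    simp

-- B side: joining after extending the last piece by one character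
theorem tfnIc_extend_last (sep : List Char) (c : Char) :
    ∀ (ps : List (List Char)), ps ≠ [] →
      List.intercalate sep (ps.dropLast ++ [(ps.getLast?.getD []) ++ [c]]) =
        List.intercalate sep ps ++ [c]
  | [], h => absurd rfl h
  | [p], _ => by simp [List.intercalate]
  | p :: q :: qs, _ => by
    rw [List.dropLast_cons_of_ne_nil (by simp : q :: qs ≠ ([] : List (List Char))),
      List.getLast?_cons_cons, List.cons_append,
      tfnIc_cons sep p ((q :: qs).dropLast ++ [((q :: qs).getLast?.getD []) ++ [c]]) (by simp),
      tfnIc_extend_last sep c (q :: qs) (by simp),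
      tfnIc_cons sep p (q :: qs) (by simp)]
    simp

-- B side: the fold of tfnStepB, joined, appends the raw flat-map
theorem tfnFoldB_join (rest : List Char) : ∀ (ps : List (List Char)), ps ≠ [] →
    List.intercalate ['_'] (rest.foldl tfnStepB ps) =
      List.intercalate ['_'] ps ++ rest.flatMap tfnRawChar := by
  induction rest with
  | nil => intro ps _; simp
  | cons c rest ih =>
    intro ps hps
    by_cases hc : 'A' ≤ c ∧ c ≤ 'Z'
    · simp only [List.foldl_cons, tfnStepB, if_pos hc]
      rw [ih (ps ++ [[c]]) (by simp), tfnIc_append_singleton _ _ ps hps]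
      simp [tfnRawChar, hc]
    · simp only [List.foldl_cons, tfnStepB, if_neg hc]
      rw [ih _ (by simp), tfnIc_extend_last _ _ ps hps]
      simp [tfnRawChar, hc]

theorem tfnLower_rawChar (c : Char) :
    (tfnRawChar c).map PySem.Chars.lowerChar = tfnTailChar c := by
  by_cases hc : 'A' ≤ c ∧ c ≤ 'Z'
  · simp [tfnRawChar, tfnTailChar, hc, (by decide : PySem.Chars.lowerChar '_' = '_')]
  · rw [tfnRawChar, tfnTailChar, if_neg hc, if_neg hc, List.map_singleton,
      tfnLowerChar_eq_headChar, tfnHeadChar, if_neg hc]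

theorem tfnAlt_eq (name : List Char) :
    PySem.Chars.lower (PySem.Chars.join ['_']
        (((name.drop 2).foldl tfnStepB [name.take 2]).map (fun p => PySem.Chars.join [] (p.map ([·]))))) =
      (name.take 2).map tfnHeadChar ++ (name.drop 2).flatMap tfnTailChar := by
  have hmap : (((name.drop 2).foldl tfnStepB [name.take 2]).map
      (fun p => PySem.Chars.join [] (p.map ([·])))) = (name.drop 2).foldl tfnStepB [name.take 2] := by
    simp [PySem.Chars.join_nil_singletons]
  rw [hmap, PySem.Chars.join, tfnFoldB_join _ [name.take 2] (by simp)]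
  simp only [PySem.Chars.lower, List.map_append, List.map_flatMap]
  congr 1
  · rw [(by simp [List.intercalate] : List.intercalate ['_'] [name.take 2] = name.take 2)]
    exact List.map_congr_left (fun c _ => tfnLowerChar_eq_headChar c)
  · exact List.flatMap_congr (fun c _ => tfnLower_rawChar c)

-- ===== VERDICT (by name: the statement is the Claim_ definition above) =====
theorem translate_file_name_spec : Claim_equal_translate_file_name := by
  intro file_name _
  unfold Spec_translate_file_name translate_file_name translate_file_name_alt
  simp only [tfnLoopA_eq, tfnAlt_eq]
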